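-- pv_equiv track=rewrite | github.com/naqushab/ScalerAcademy | Scaler/Advanced/Queue - I/N integers containing only 1, 2 & 3.py | solve
-- ===== SOURCE A (Python) =====
-- import collections
--
-- def solve(A):
--     ans = []
--     q = collections.deque()
--     q.append(1)
--     q.append(2)
--     q.append(3)
--     while q:
--         d = q.popleft()
--         q.append(d*10+1)
--         q.append(d*10+2)
--         q.append(d*10+3)
--         if len(ans) != A:
--             ans.append(d)
--         else:
--             return ans
-- ===== SOURCE B (Python) =====
-- def solve(A):
--     ans = []
--     for i in range(1, A + 1):
--         n = i
--         v = 0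
--         p = 1
--         while n:
--             d = n % 3
--             if d == 0:
--                 d = 3
--                 n = n // 3 - 1
--             else:
--                 n = n // 3
--             v += d * p
--             p *= 10
--         ans.append(v)
--     return ans
-- ===== Notes on version B (the rewrite author's own statement) =====
-- stated objective: alternative
-- what changed: Replaces the BFS deque that generates all {1,2,3}-digit numbers level by level with a direct closed-form construction: the k-th element is computed independently as the bijective base-3 numeral of k, so no queue is kept at all.
import Mathlib
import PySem

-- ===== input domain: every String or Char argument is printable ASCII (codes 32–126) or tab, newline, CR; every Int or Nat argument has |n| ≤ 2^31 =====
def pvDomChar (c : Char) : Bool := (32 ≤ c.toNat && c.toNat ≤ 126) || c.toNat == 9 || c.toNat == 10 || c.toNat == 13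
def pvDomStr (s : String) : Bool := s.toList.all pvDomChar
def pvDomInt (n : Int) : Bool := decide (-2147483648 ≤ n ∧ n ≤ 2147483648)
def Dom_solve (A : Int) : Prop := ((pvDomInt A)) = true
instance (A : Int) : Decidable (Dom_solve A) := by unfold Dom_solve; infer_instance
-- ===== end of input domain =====

-- B replaces A's BFS deque by computing each element directly as a bijective base-3 numeral
-- (alternative decomposition, no queue; equal cost).

-- ===== PORT A =====
-- the while loop of A; the deque is a List Int (popleft = head, append = ++ [·]).
-- fuel is a totality guard only: the loop pops exactly A+1 elements before returning.
def solveLoop : Nat → List Int → List Int → Int → List Int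
  | 0, _, ans, _ => ans
  | fuel + 1, q, ans, A =>
    match q with
    | [] => ans
    | d :: rest =>
      let q' := rest ++ [d * 10 + 1, d * 10 + 2, d * 10 + 3]
      if (ans.length : Int) ≠ A then solveLoop fuel q' (ans ++ [d]) A
      else ans

def solve (A : Int) : List Int := solveLoop (A.toNat + 1) [1, 2, 3] [] A

-- ===== PORT B =====
-- inner while loop of Source B; fuel is a totality guard (n shrinks each step for n ≥ 1).
def bijLoop : Nat → Int → Int → Int → Int
  | 0, _, v, _ => v
  | fuel + 1, n, v, p =>
    if n = 0 then v
    else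
      let d := PySem.Int.mod n 3
      if d = 0 then bijLoop fuel (PySem.Int.floordiv n 3 - 1) (v + 3 * p) (p * 10)
      else bijLoop fuel (PySem.Int.floordiv n 3) (v + d * p) (p * 10)

def solve_alt (A : Int) : List Int :=
  (PySem.List.pyRange 1 (A + 1) 1).map (fun i => bijLoop (i.toNat + 1) i 0 1)

-- ===== PRECONDITION & SPEC =====
-- A loops forever when A < 0 (len(ans) never equals A), so only A ≥ 0 is admitted.
def Pre_solve (A : Int) : Prop := 0 ≤ A
instance (A : Int) : Decidable (Pre_solve A) := by unfold Pre_solve; infer_instance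
def pvWitness_solve : Int := (5)

def Spec_solve (A : Int) (out : List Int) : Prop := out = solve_alt A
instance (A : Int) (out : List Int) : Decidable (Spec_solve A out) := by unfold Spec_solve; infer_instance

-- ===== CLAIM (what is proved, stated in full; the proofs are below) =====
def Claim_equal_solve : Prop := ∀ (A : Int), Dom_solve A → Pre_solve A → Spec_solve A (solve A)

-- ===== LEMMAS AND PROOFS =====

-- the k-th (1-based) positive integer whose decimal digits are all in {1,2,3}: bijective base 3
def fIdx : Nat → Int
  | 0 => 0
  | n + 1 => fIdx (n / 3) * 10 + ((n % 3 : Nat) + 1)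
decreasing_by exact Nat.lt_succ_of_le (Nat.div_le_self n 3)

lemma fIdx_succ (n : Nat) : fIdx (n + 1) = fIdx (n / 3) * 10 + ((n % 3 : Nat) + 1) := by
  simp [fIdx]

lemma fIdx_child (m d : Nat) (h1 : 1 ≤ d) (h2 : d ≤ 3) :
    fIdx (3 * m + d) = fIdx m * 10 + d := by
  have h : 3 * m + d = (3 * m + (d - 1)) + 1 := by omega
  rw [h, fIdx_succ]
  have hdiv : (3 * m + (d - 1)) / 3 = m := by omega
  have hmod : (3 * m + (d - 1)) % 3 = d - 1 := by omega
  rw [hdiv, hmod]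
  have : ((d - 1 : Nat) : Int) + 1 = (d : Int) := by omega
  rw [this]

lemma bijLoop_eq (fuel : Nat) : ∀ (n : Nat) (v p : Int), n < fuel →
    bijLoop fuel (n : Int) v p = v + fIdx n * p := by
  induction fuel with
  | zero => intro n v p h; omega
  | succ f ih =>
    intro n v p h
    match n with
    | 0 => simp [bijLoop, fIdx]
    | m + 1 =>
      rw [bijLoop]
      have hne : ((m + 1 : Nat) : Int) ≠ 0 := by exact_mod_cast Nat.succ_ne_zero m
      rw [if_neg hne]
      have hmod : PySem.Int.mod ((m + 1 : Nat) : Int) 3 = (((m + 1) % 3 : Nat) : Int) := by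
        exact_mod_cast PySem.Int.mod_natCast (m + 1) 3
      have hdiv : PySem.Int.floordiv ((m + 1 : Nat) : Int) 3 = (((m + 1) / 3 : Nat) : Int) := by
        exact_mod_cast PySem.Int.floordiv_natCast (m + 1) 3
      simp only [hmod, hdiv]
      by_cases h0 : (m + 1) % 3 = 0
      · rw [if_pos (by exact_mod_cast h0)]
        have hpos : 1 ≤ (m + 1) / 3 := by omega
        have hcast : (((m + 1) / 3 : Nat) : Int) - 1 = (((m + 1) / 3 - 1 : Nat) : Int) := by omega
        rw [hcast, ih ((m + 1) / 3 - 1) _ _ (by omega)]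
        have hm3 : m % 3 = 2 := by omega
        have hd3 : m / 3 = (m + 1) / 3 - 1 := by omega
        rw [fIdx_succ, hm3, hd3]
        push_cast
        ring
      · rw [if_neg (by exact_mod_cast h0)]
        rw [ih ((m + 1) / 3) _ _ (by omega)]
        have hm3 : m % 3 = (m + 1) % 3 - 1 := by omega
        have hd3 : m / 3 = (m + 1) / 3 := by omega
        rw [fIdx_succ, hm3, hd3]
        have : (((m + 1) % 3 - 1 : Nat) : Int) + 1 = (((m + 1) % 3 : Nat) : Int) := by omega
        rw [this]
        ring

lemma range'_three (s : Nat) : List.range' s 3 = [s, s + 1, s + 2] := by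
  simp [List.range', Nat.add_assoc]

lemma loop_inv (fuel : Nat) : ∀ (k : Nat) (A : Int), (k : Int) ≤ A → A < (k : Int) + fuel →
    solveLoop fuel ((List.range' (k + 1) (2 * k + 3)).map fIdx)
      ((List.range' 1 k).map fIdx) A = (List.range' 1 A.toNat).map fIdx := by
  induction fuel with
  | zero => intro k A h1 h2; omega
  | succ f ih =>
    intro k A h1 h2
    have hq : List.range' (k + 1) (2 * k + 3) = (k + 1) :: List.range' (k + 2) (2 * k + 2) := by
      rw [List.range'_succ]
    rw [hq, List.map_cons, solveLoop]
    simp only [List.length_map, List.length_range']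
    by_cases hkA : (k : Int) = A
    · rw [if_neg (by simpa using hkA)]
      have hA : k = A.toNat := by omega
      rw [hA]
    · rw [if_pos (by simpa using hkA)]
      have hch1 : fIdx (k + 1) * 10 + 1 = fIdx (3 * (k + 1) + 1) := by
        rw [fIdx_child (k + 1) 1 (by omega) (by omega)]; norm_num
      have hch2 : fIdx (k + 1) * 10 + 2 = fIdx (3 * (k + 1) + 2) := by
        rw [fIdx_child (k + 1) 2 (by omega) (by omega)]; norm_num
      have hch3 : fIdx (k + 1) * 10 + 3 = fIdx (3 * (k + 1) + 3) := by
        rw [fIdx_child (k + 1) 3 (by omega) (by omega)]; norm_num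
      have hq' : (List.range' (k + 2) (2 * k + 2)).map fIdx ++
          [fIdx (k + 1) * 10 + 1, fIdx (k + 1) * 10 + 2, fIdx (k + 1) * 10 + 3]
          = (List.range' ((k + 1) + 1) (2 * (k + 1) + 3)).map fIdx := by
        rw [hch1, hch2, hch3]
        have : [fIdx (3 * (k + 1) + 1), fIdx (3 * (k + 1) + 2), fIdx (3 * (k + 1) + 3)]
            = (List.range' (3 * k + 4) 3).map fIdx := by
          rw [range'_three, List.map_cons, List.map_cons, List.map_cons, List.map_nil]
          have e1 : 3 * (k + 1) + 1 = 3 * k + 4 := by omega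
          have e2 : 3 * (k + 1) + 2 = 3 * k + 4 + 1 := by omega
          have e3 : 3 * (k + 1) + 3 = 3 * k + 4 + 2 := by omega
          rw [e1, e2, e3]
        rw [this, ← List.map_append]
        congr 1
        have harg : List.range' (3 * k + 4) 3 = List.range' ((k + 2) + 1 * (2 * k + 2)) 3 := by
          congr 1; omega
        rw [harg, List.range'_append]
        congr 1
      have hans : (List.range' 1 k).map fIdx ++ [fIdx (k + 1)]
          = (List.range' 1 (k + 1)).map fIdx := by
        rw [List.range'_concat, List.map_append]
        simp [Nat.add_comm]
      rw [hq', hans]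
      have hlt : (k : Int) < A := lt_of_le_of_ne h1 hkA
      have h2' : A < ((k + 1 : Nat) : Int) + (f : Nat) := by push_cast; push_cast at h2; omega
      exact ih (k + 1) A (by push_cast; omega) h2'

lemma solve_alt_eq (A : Int) (hA : 0 ≤ A) :
    solve_alt A = (List.range A.toNat).map (fun k => fIdx (k + 1)) := by
  unfold solve_alt
  rw [PySem.List.pyRange_one]
  rw [List.map_map]
  have hlen : (A + 1 - 1).toNat = A.toNat := by omega
  rw [hlen]
  apply List.map_congr_left
  intro k _
  simp only [Function.comp]
  have h1 : ((1 : Int) + k).toNat = k + 1 := by omega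
  have h2 : ((1 : Int) + k) = ((k + 1 : Nat) : Int) := by push_cast; ring
  rw [h1, h2, bijLoop_eq (k + 2) (k + 1) 0 1 (by omega)]
  ring

-- ===== VERDICT (by name: the statement is the Claim_ definition above) =====
theorem solve_spec : Claim_equal_solve := by
  intro A _ hPre
  unfold Spec_solve
  have hA : 0 ≤ A := hPre
  have hstart : solve A = solveLoop (A.toNat + 1) ((List.range' 1 3).map fIdx)
      ((List.range' 1 0).map fIdx) A := by
    unfold solve
    congr 1
    · have f1 : fIdx 1 = 1 := by simp [fIdx]
      have f2 : fIdx 2 = 2 := by simp [fIdx]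
      have f3 : fIdx 3 = 3 := by simp [fIdx]
      rw [range'_three, List.map_cons, List.map_cons, List.map_cons, List.map_nil]
      norm_num [f1, f2, f3]
  rw [hstart]
  have := loop_inv (A.toNat + 1) 0 A (by exact_mod_cast hA) (by push_cast; omega)
  simp only [Nat.mul_zero, Nat.zero_add] at this
  rw [this, solve_alt_eq A hA, List.range'_eq_map_range]
  rw [List.map_map]
  apply List.map_congr_left
  intro k _
  simp [Function.comp, Nat.add_comm]
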